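-- pv_equiv track=rewrite | github.com/MrBrantCode/unitest_baseline | mut_generate/mist_train_taco/taco_8055/solution.py | min_toggles_to_partition
-- ===== SOURCE A (Python) =====
-- def min_toggles_to_partition(arr):
--     n = len(arr)
--     pref = [0] * n
--     suff = [0] * n
--
--     # Calculate prefix sums of 1s
--     pref[0] = arr[0]
--     for i in range(1, n):
--         pref[i] = pref[i - 1] + arr[i]
--
--     # Calculate suffix sums of 1s
--     suff[n - 1] = arr[n - 1]
--     for i in range(n - 2, -1, -1):
--         suff[i] = suff[i + 1] + arr[i]
--
--     # Calculate the minimum toggles required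
--     ans = float('inf')
--     for i in range(n - 1):
--         ans = min(ans, pref[i] + (n - i - 1) - suff[i + 1])
--     ans = min(ans, pref[n - 1])
--
--     return ans
-- ===== SOURCE B (Python) =====
-- def min_toggles_to_partition(arr):
--     n = len(arr)
--     total = sum(arr)
--     ones = arr[0]
--     best = 2 * ones + (n - 1) - total
--     for i, x in enumerate(arr[1:], 1):
--         ones += x
--         c = 2 * ones + (n - 1 - i) - total
--         if c < best:
--             best = c
--     return best
-- ===== Notes on version B (the rewrite author's own statement) =====
-- stated objective: simpler
-- what changed: Replaces A's two auxiliary arrays (prefix and suffix sums) and its separate final-case line by a single pass keeping a running prefix sum, using the identity suff[i+1] = total - pref[i] to compute each cost as 2*ones + (n-1-i) - total, with the final case as index i = n-1 of the same formula.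
import Mathlib
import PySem

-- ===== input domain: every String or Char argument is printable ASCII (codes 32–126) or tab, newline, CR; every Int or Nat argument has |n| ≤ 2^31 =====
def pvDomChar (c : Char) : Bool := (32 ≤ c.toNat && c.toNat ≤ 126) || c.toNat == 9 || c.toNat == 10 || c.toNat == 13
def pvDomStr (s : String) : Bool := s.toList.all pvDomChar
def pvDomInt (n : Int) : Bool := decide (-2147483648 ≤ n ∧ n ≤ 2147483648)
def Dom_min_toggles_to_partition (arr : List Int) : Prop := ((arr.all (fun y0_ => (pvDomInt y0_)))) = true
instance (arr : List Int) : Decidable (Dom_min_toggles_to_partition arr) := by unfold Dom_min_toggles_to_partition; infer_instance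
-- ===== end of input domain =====

-- B replaces A's prefix and suffix arrays and A's separate final case by one pass with a
-- running prefix count and the cost 2*ones + (n-1-i) - total (objective: simpler).

-- ===== PORT A =====
-- prefix-sum array builder: pvPrefAux acc xs = [acc+xs[0], acc+xs[0]+xs[1], …]
def pvPrefAux (acc : Int) : List Int → List Int
  | [] => []
  | x :: xs => (acc + x) :: pvPrefAux (acc + x) xs

-- Python's min with ans starting at float('inf'): none plays inf
def pvOptMin (a : Option Int) (x : Int) : Option Int :=
  match a with
  | none => some x
  | some b => some (min b x)

-- the final 'ans = min(ans, pref[n-1])' followed by 'return ans' (inf never survives it)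
def pvFin (a : Option Int) (v : Int) : Int :=
  match a with
  | none => v
  | some b => min b v

def min_toggles_to_partition (arr : List Int) : Int :=
  let n := arr.length
  let pref := pvPrefAux 0 arr
  let suff := (pvPrefAux 0 arr.reverse).reverse
  let ans : Option Int := (List.range (n - 1)).foldl
    (fun a i => pvOptMin a (pref.getD i 0 + ((n : Int) - (i : Int) - 1) - suff.getD (i + 1) 0)) none
  pvFin ans (pref.getD (n - 1) 0)

-- ===== PORT B =====
def pvAltLoop (n total : Int) : Int → Int → Int → List Int → Int
  | _, _, best, [] => best
  | i, ones, best, x :: xs =>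
      let ones' := ones + x
      let c := 2 * ones' + (n - 1 - i) - total
      pvAltLoop n total (i + 1) ones' (if c < best then c else best) xs

def min_toggles_to_partition_alt (arr : List Int) : Int :=
  let n : Int := arr.length
  let total := arr.sum
  let ones := arr.headD 0
  let best := 2 * ones + (n - 1) - total
  pvAltLoop n total 1 ones best (arr.drop 1)

-- ===== PRECONDITION & SPEC =====
-- Pre_ excludes the empty list, on which Python A raises IndexError at arr[0] (B raises too).
def Pre_min_toggles_to_partition (arr : List Int) : Prop := arr ≠ []
instance (arr : List Int) : Decidable (Pre_min_toggles_to_partition arr) := by unfold Pre_min_toggles_to_partition; infer_instance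
def pvWitness_min_toggles_to_partition : List Int := [1, 0, 1]

def Spec_min_toggles_to_partition (arr : List Int) (out : Int) : Prop := out = min_toggles_to_partition_alt arr
instance (arr : List Int) (out : Int) : Decidable (Spec_min_toggles_to_partition arr out) := by unfold Spec_min_toggles_to_partition; infer_instance

-- ===== CLAIM (what is proved, stated in full; the proofs are below) =====
def Claim_equal_min_toggles_to_partition : Prop := ∀ (arr : List Int), Dom_min_toggles_to_partition arr → Pre_min_toggles_to_partition arr → Spec_min_toggles_to_partition arr (min_toggles_to_partition arr)

-- ===== LEMMAS AND PROOFS =====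
-- the common cost function: 2·(sum of arr[0..j]) + (n-1-j) - total
def pvG (arr : List Int) (j : Nat) : Int :=
  2 * ((arr.take (j + 1)).sum) + ((arr.length : Int) - 1 - (j : Int)) - arr.sum

theorem pvPrefAux_length (acc : Int) (xs : List Int) : (pvPrefAux acc xs).length = xs.length := by
  induction xs generalizing acc with
  | nil => simp [pvPrefAux]
  | cons x xs ih => simp [pvPrefAux, ih]

theorem pvPrefAux_getD (xs : List Int) (acc : Int) (i : Nat) (h : i < xs.length) :
    (pvPrefAux acc xs).getD i 0 = acc + (xs.take (i + 1)).sum := by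
  induction xs generalizing acc i with
  | nil => simp at h
  | cons x xs ih =>
      cases i with
      | zero => simp [pvPrefAux]
      | succ i =>
          simp only [pvPrefAux, List.getD_cons_succ, List.take_succ_cons, List.sum_cons]
          rw [ih (acc + x) i (by simpa using h)]
          ring

theorem pvSuff_getD (arr : List Int) (i : Nat) (h : i < arr.length) :
    ((pvPrefAux 0 arr.reverse).reverse).getD i 0 = (arr.drop i).sum := by
  have hlen : (pvPrefAux 0 arr.reverse).length = arr.length := by
    rw [pvPrefAux_length, List.length_reverse]
  have h1 : ((pvPrefAux 0 arr.reverse).reverse).getD i 0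
      = (pvPrefAux 0 arr.reverse).getD (arr.length - 1 - i) 0 := by
    rw [List.getD_eq_getElem _ _ (by simp [hlen]; omega),
        List.getD_eq_getElem _ _ (by rw [hlen]; omega)]
    simp [List.getElem_reverse, hlen]
  rw [h1, pvPrefAux_getD _ 0 _ (by simp; omega)]
  have h2 : arr.length - 1 - i + 1 = arr.length - i := by omega
  rw [h2, List.take_reverse]
  have h3 : arr.length - (arr.length - i) = i := by omega
  rw [h3, List.sum_reverse, zero_add]

theorem pvFoldOpt (l : List Nat) (F : Nat → Int) (b : Int) :
    l.foldl (fun a i => pvOptMin a (F i)) (some b) = some (l.foldl (fun a i => min a (F i)) b) := by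
  induction l generalizing b with
  | nil => rfl
  | cons x xs ih =>
      rw [List.foldl_cons, List.foldl_cons]
      exact ih (min b (F x))

theorem pvFoldlCongr (l : List Nat) (f g : Int → Nat → Int) (b : Int)
    (h : ∀ x ∈ l, ∀ a, f a x = g a x) : l.foldl f b = l.foldl g b := by
  induction l generalizing b with
  | nil => rfl
  | cons x xs ih =>
      rw [List.foldl_cons, List.foldl_cons, h x (by simp)]
      exact ih _ (fun y hy a => h y (by simp [hy]) a)

-- A's loop-body cost at i < n-1 equals pvG
theorem pvF_eq_pvG (arr : List Int) (i : Nat) (h : i + 1 < arr.length) :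
    (pvPrefAux 0 arr).getD i 0 + ((arr.length : Int) - (i : Int) - 1)
        - ((pvPrefAux 0 arr.reverse).reverse).getD (i + 1) 0 = pvG arr i := by
  rw [pvPrefAux_getD _ 0 _ (by omega), pvSuff_getD _ _ h]
  have hsum := List.sum_take_add_sum_drop arr (i + 1)
  unfold pvG
  omega

-- A's final term pref[n-1] equals pvG (n-1)
theorem pvLast_eq_pvG (arr : List Int) (h : arr ≠ []) :
    (pvPrefAux 0 arr).getD (arr.length - 1) 0 = pvG arr (arr.length - 1) := by
  have hn : 0 < arr.length := List.length_pos_of_ne_nil h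
  rw [pvPrefAux_getD _ 0 _ (by omega)]
  have h1 : arr.length - 1 + 1 = arr.length := by omega
  rw [h1, List.take_length]
  unfold pvG
  rw [h1, List.take_length]
  have : ((arr.length - 1 : Nat) : Int) = (arr.length : Int) - 1 := by omega
  rw [this]; ring

-- A equals the min-fold of pvG over 1..n-1 started at pvG 0
theorem pvA_eq_fold (arr : List Int) (h : arr ≠ []) :
    min_toggles_to_partition arr
      = List.foldl (fun a j => min a (pvG arr j)) (pvG arr 0) (List.range' 1 (arr.length - 1)) := by
  have hn : 0 < arr.length := List.length_pos_of_ne_nil h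
  unfold min_toggles_to_partition
  dsimp only
  cases hm : arr.length - 1 with
  | zero =>
      simp only [List.range_zero, List.foldl_nil, List.range'_zero]
      rw [← hm]
      exact pvLast_eq_pvG arr h
  | succ m =>
      have hconcat : List.range' 1 (m + 1) = List.range' 1 m ++ [m + 1] := by
        rw [List.range'_concat, show 1 + 1 * m = m + 1 from by omega]
      conv_rhs => rw [hconcat, List.foldl_append, List.foldl_cons, List.foldl_nil]
      simp only [List.range_eq_range', List.range'_succ, List.foldl_cons]
      have hstep : pvOptMin none ((pvPrefAux 0 arr).getD 0 0 + ((arr.length : Int) - ((0:Nat) : Int) - 1)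
          - ((pvPrefAux 0 arr.reverse).reverse).getD (0 + 1) 0) = some (pvG arr 0) := by
        rw [show (0:Nat) + 1 = 1 from rfl]
        have := pvF_eq_pvG arr 0 (by omega)
        simp only [pvOptMin]
        rw [← this]
      rw [hstep, pvFoldOpt]
      have hcongr : List.foldl (fun a i => min a ((pvPrefAux 0 arr).getD i 0 + ((arr.length : Int) - (i : Int) - 1)
            - ((pvPrefAux 0 arr.reverse).reverse).getD (i + 1) 0)) (pvG arr 0) (List.range' (0+1) m)
          = List.foldl (fun a j => min a (pvG arr j)) (pvG arr 0) (List.range' (0+1) m) := by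
        apply pvFoldlCongr
        intro x hx a
        have hx' : 1 ≤ x ∧ x < 1 + m := by
          have := List.mem_range'_1.mp hx
          omega
        rw [pvF_eq_pvG arr x (by omega)]
      rw [hcongr]
      have hlast : (pvPrefAux 0 arr).getD (m + 1) 0 = pvG arr (m + 1) := by
        rw [← hm]; exact pvLast_eq_pvG arr h
      simp only [pvFin, hlast, Nat.zero_add]

theorem pvAltLoop_spec (arr : List Int) (xs : List Int) (i : Nat) (ones best : Int)
    (h1 : ones = (arr.take i).sum) (h2 : xs = arr.drop i) :
    pvAltLoop (arr.length : Int) arr.sum (i : Int) ones best xs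
      = List.foldl (fun b j => min b (pvG arr j)) best (List.range' i xs.length) := by
  induction xs generalizing i ones best with
  | nil => simp [pvAltLoop]
  | cons x xs ih =>
      have hi : i < arr.length := by
        by_contra hle
        rw [List.drop_eq_nil_of_le (by omega)] at h2
        exact List.cons_ne_nil x xs h2
      have hsplit : arr[i] :: arr.drop (i + 1) = x :: xs := by
        rw [List.getElem_cons_drop hi, ← h2]
      have hx : arr[i] = x := (List.cons_eq_cons.mp hsplit).1
      have hxs : arr.drop (i + 1) = xs := (List.cons_eq_cons.mp hsplit).2
      have hones' : ones + x = (arr.take (i + 1)).sum := by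
        rw [List.sum_take_succ arr i hi, ← h1, hx]
      simp only [pvAltLoop, List.length_cons, List.range'_succ, List.foldl_cons]
      have hc : 2 * (ones + x) + ((arr.length : Int) - 1 - (i : Int)) - arr.sum = pvG arr i := by
        rw [hones']; rfl
      have hmin : (if 2 * (ones + x) + ((arr.length : Int) - 1 - (i : Int)) - arr.sum < best
            then 2 * (ones + x) + ((arr.length : Int) - 1 - (i : Int)) - arr.sum else best)
          = min best (pvG arr i) := by
        rw [← hc, min_def]
        split_ifs <;> omega
      rw [show ((i : Int) + 1) = ((i + 1 : Nat) : Int) by push_cast; ring]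
      rw [show (2 * (ones + x) + ((arr.length : Int) - 1 - (i : Int)) - arr.sum) = pvG arr i from hc] at hmin ⊢
      rw [hmin]
      exact ih (i + 1) (ones + x) _ hones' hxs.symm

theorem pvB_eq_fold (arr : List Int) (h : arr ≠ []) :
    min_toggles_to_partition_alt arr
      = List.foldl (fun a j => min a (pvG arr j)) (pvG arr 0) (List.range' 1 (arr.length - 1)) := by
  match arr with
  | x :: rest =>
      unfold min_toggles_to_partition_alt
      simp only [List.headD_cons, List.drop_succ_cons, List.drop_zero]
      have hbest : 2 * x + (((x :: rest).length : Int) - 1) - (x :: rest).sum = pvG (x :: rest) 0 := by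
        unfold pvG; simp
      rw [hbest]
      have := pvAltLoop_spec (x :: rest) rest 1 x (pvG (x :: rest) 0) (by simp) (by simp)
      simp only [Nat.cast_one] at this
      rw [this]
      simp

-- ===== VERDICT (by name: the statement is the Claim_ definition above) =====
theorem min_toggles_to_partition_spec : Claim_equal_min_toggles_to_partition := by
  intro arr _ hpre
  unfold Spec_min_toggles_to_partition
  rw [pvA_eq_fold arr hpre, pvB_eq_fold arr hpre]
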